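-- pv_equiv track=rewrite | github.com/1-Liam/DENSN-Atlas | densn/benchmarks/credit_window.py | _interface_is_constant
-- ===== SOURCE A (Python) =====
-- from typing import Any
--
-- def _interface_is_constant(record: dict[str, Any] | None) -> bool | None:
--     if record is None:
--         return None
--     truth_table = record.get("interface_definition", {}).get("truth_table", {})
--     values = set(bool(value) for value in truth_table.values())
--     if not values:
--         return None
--     return len(values) == 1
-- ===== SOURCE B (Python) =====
-- def _interface_is_constant(record):
--     if record is None:
--         return None
--     values = iter(record.get("interface_definition", {}).get("truth_table", {}).values())
--     try:
--         first = bool(next(values))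
--     except StopIteration:
--         return None
--     for v in values:
--         if bool(v) != first:
--             return False
--     return True
-- ===== Notes on version B (the rewrite author's own statement) =====
-- stated objective: simpler
-- what changed: B replaces A's dedup-set construction (len(set)==1) by an early-exit compare-to-first scan: take the truthiness of the first value and return False as soon as any later value's truthiness differs, True otherwise.
import Mathlib
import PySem

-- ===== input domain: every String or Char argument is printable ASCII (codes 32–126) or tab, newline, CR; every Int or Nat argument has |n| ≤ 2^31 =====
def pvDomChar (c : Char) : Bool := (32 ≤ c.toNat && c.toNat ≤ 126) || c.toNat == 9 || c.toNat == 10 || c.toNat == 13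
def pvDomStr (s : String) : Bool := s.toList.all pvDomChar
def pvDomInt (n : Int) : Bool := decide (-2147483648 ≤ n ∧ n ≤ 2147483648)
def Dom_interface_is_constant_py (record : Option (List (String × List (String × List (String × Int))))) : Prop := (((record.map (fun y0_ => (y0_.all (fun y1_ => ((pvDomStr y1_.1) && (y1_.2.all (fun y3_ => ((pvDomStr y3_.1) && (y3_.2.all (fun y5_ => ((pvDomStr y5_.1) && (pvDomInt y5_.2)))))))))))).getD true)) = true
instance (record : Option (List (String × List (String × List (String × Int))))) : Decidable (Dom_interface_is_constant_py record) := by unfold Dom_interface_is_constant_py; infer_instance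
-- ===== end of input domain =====

-- B replaces A's dedup-set (len(set)==1) by an early-exit compare-to-first scan; objective: simpler.

-- ===== PORT A =====
def interface_is_constant_py (record : Option (List (String × List (String × List (String × Int))))) : Option Bool :=
  match record with
  | none => none
  | some r =>
    let truth_table := (PySem.Dict.mk ((PySem.Dict.mk r).getD "interface_definition" [])).getD "truth_table" []
    let values : PySem.Set Bool := PySem.Set.ofList ((PySem.Dict.mk truth_table).values.map (fun v => decide (v ≠ 0)))
    if values = [] then none
    else some (decide (PySem.Set.len values = 1))

-- ===== PORT B =====
-- the for-loop in Source B: return false on the first value whose truthiness differs from `first`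
def pvScanRest (first : Bool) : List Int → Bool
  | [] => true
  | v :: rest => if decide (v ≠ 0) != first then false else pvScanRest first rest

def interface_is_constant_py_alt (record : Option (List (String × List (String × List (String × Int))))) : Option Bool :=
  match record with
  | none => none
  | some r =>
    match (PySem.Dict.mk ((PySem.Dict.mk ((PySem.Dict.mk r).getD "interface_definition" [])).getD "truth_table" [])).values with
    | [] => none
    | v0 :: rest => some (pvScanRest (decide (v0 ≠ 0)) rest)

-- ===== PRECONDITION & SPEC =====
def Spec_interface_is_constant_py (record : Option (List (String × List (String × List (String × Int))))) (out : Option Bool) : Prop := out = interface_is_constant_py_alt record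
instance (record : Option (List (String × List (String × List (String × Int))))) (out : Option Bool) : Decidable (Spec_interface_is_constant_py record out) := by unfold Spec_interface_is_constant_py; infer_instance

-- ===== CLAIM (what is proved, stated in full; the proofs are below) =====
def Claim_equal_interface_is_constant_py : Prop := ∀ (record : Option (List (String × List (String × List (String × Int))))), Dom_interface_is_constant_py record → Spec_interface_is_constant_py record (interface_is_constant_py record)

-- ===== LEMMAS AND PROOFS =====

-- the scan returns true iff every value's truthiness equals `first`
theorem pv_scan_iff (first : Bool) (vs : List Int) :
    pvScanRest first vs = true ↔ ∀ v ∈ vs, decide (v ≠ 0) = first := by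
  induction vs with
  | nil => simp [pvScanRest]
  | cons v vs ih =>
    simp only [pvScanRest, List.forall_mem_cons]
    cases hv : decide (v ≠ 0) <;> cases first <;> simp [ih]

-- a duplicate-free list of Bools has length given by membership of true and false
theorem pv_nodup_bool_length (l : List Bool) (h : l.Nodup) :
    l.length = (if true ∈ l then 1 else 0) + (if false ∈ l then 1 else 0) := by
  rcases l with _ | ⟨a, _ | ⟨b, _ | ⟨c, l⟩⟩⟩
  · simp
  · cases a <;> simp
  · cases a <;> cases b <;> simp_all
  · exfalso; cases a <;> cases b <;> cases c <;> simp_all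

theorem pv_ofList_eq_nil_iff {α : Type} [BEq α] [LawfulBEq α] (xs : List α) :
    PySem.Set.ofList xs = [] ↔ xs = [] := by
  cases xs with
  | nil => simp [PySem.Set.ofList_nil]
  | cons x xs => simp [PySem.Set.ofList_cons]

-- the dedup set of b :: bs has one element iff every element of bs equals b
theorem pv_set_len_one (b : Bool) (bs : List Bool) :
    (PySem.Set.ofList (b :: bs)).length = 1 ↔ ∀ x ∈ bs, x = b := by
  have hset : (PySem.Set.ofList (b :: bs)).length
      = (if true ∈ b :: bs then 1 else 0) + (if false ∈ b :: bs then 1 else 0) := by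
    have := pv_nodup_bool_length (PySem.Set.ofList (b :: bs)) (PySem.Set.nodup_ofList _)
    simpa [PySem.Set.mem_ofList] using this
  rw [hset]
  cases b with
  | false =>
    simp only [List.mem_cons]
    constructor
    · intro h x hx
      by_cases ht : true ∈ bs
      · simp [ht] at h
      · cases x with
        | false => rfl
        | true => exact absurd hx ht
    · intro h
      have : true ∉ bs := fun ht => by simpa using h true ht
      simp [this]
  | true =>
    simp only [List.mem_cons]
    constructor
    · intro h x hx
      by_cases hf : false ∈ bs
      · simp [hf] at h
      · cases x with
        | true => rfl
        | false => exact absurd hx hf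
    · intro h
      have : false ∉ bs := fun hf => by simpa using h false hf
      simp [this]

-- ===== VERDICT (by name: the statement is the Claim_ definition above) =====
theorem interface_is_constant_py_spec : Claim_equal_interface_is_constant_py := by
  intro record _
  unfold Spec_interface_is_constant_py interface_is_constant_py interface_is_constant_py_alt
  cases record with
  | none => rfl
  | some r =>
    simp only
    set vs := (PySem.Dict.mk ((PySem.Dict.mk ((PySem.Dict.mk r).getD "interface_definition" [])).getD "truth_table" [])).values with hvs
    cases vs with
    | nil => simp
    | cons v0 rest =>
      have hbne : PySem.Set.ofList ((decide (v0 ≠ 0)) :: rest.map (fun v => decide (v ≠ 0))) ≠ [] :=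
        fun h => by simpa using (pv_ofList_eq_nil_iff _).mp h
      simp only [List.map_cons, PySem.Set.len]
      rw [if_neg hbne]
      congr 1
      rw [Bool.eq_iff_iff, decide_eq_true_iff, Nat.cast_eq_one,
        pv_set_len_one (decide (v0 ≠ 0)) (rest.map (fun v => decide (v ≠ 0))),
        pv_scan_iff (decide (v0 ≠ 0)) rest]
      constructor
      · intro h v hv
        exact h _ (List.mem_map_of_mem hv)
      · intro h x hx
        obtain ⟨v, hv, rfl⟩ := List.mem_map.mp hx
        exact h v hv
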